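-- pv_equiv track=rewrite | github.com/omri-alt/advantixTLBX | integrations/ecomnia_geo_lists.py | merge_recommended_into_geo_map
-- ===== SOURCE A (Python) =====
-- from typing import Any, Dict, List, Mapping, Optional, Sequence, Tuple
--
-- def normalize_geo_key(geo: str) -> str:
--     g = (geo or "").strip().lower()
--     if g == "gb":
--         return "uk"
--     return g
--
-- def merge_recommended_into_geo_map(
--     geo_map: Dict[str, Dict[str, List[str]]],
--     recommended_by_geo: Mapping[str, Sequence[str]],
-- ) -> Dict[str, Dict[str, List[str]]]:
--     """Return new map: blacklist = sorted union of sheet + recommended per geo."""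
--     out = {g: {"blacklist": list(v.get("blacklist", [])), "whitelist": list(v.get("whitelist", []))} for g, v in geo_map.items()}
--     for geo, sources in recommended_by_geo.items():
--         g = normalize_geo_key(geo)
--         bucket = out.setdefault(g, {"blacklist": [], "whitelist": []})
--         merged = set(bucket["blacklist"]) | set(sources)
--         bucket["blacklist"] = sorted(merged)
--     return out
-- ===== SOURCE B (Python) =====
-- def normalize_geo_key(geo: str) -> str:
--     g = (geo or "").strip().lower()
--     if g == "gb":
--         return "uk"
--     return g
--
--
-- def merge_recommended_into_geo_map(geo_map, recommended_by_geo):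
--     """Index the recommended sources by normalized geo once, then build the
--     result in one pass over geo_map plus one pass over the leftover geos."""
--     rec = {}
--     for geo, sources in recommended_by_geo.items():
--         k = normalize_geo_key(geo)
--         rec[k] = rec.get(k, set()) | set(sources)
--     items = [(g, {"blacklist": sorted(set(v.get("blacklist", [])) | rec[g])
--                                if g in rec else list(v.get("blacklist", [])),
--                   "whitelist": list(v.get("whitelist", []))})
--              for g, v in geo_map.items()]
--     items += [(k, {"blacklist": sorted(s), "whitelist": []})
--               for k, s in rec.items() if k not in geo_map]
--     return dict(items)
-- ===== Notes on version B (the rewrite author's own statement) =====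
-- stated objective: alternative
-- what changed: B first aggregates all recommended sources into one per-normalized-geo set index and then emits every output entry exactly once (a single pass over geo_map plus the leftover recommended geos), instead of A's per-recommendation setdefault/union/re-sort of the growing blacklist inside the output map.
import Mathlib
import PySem

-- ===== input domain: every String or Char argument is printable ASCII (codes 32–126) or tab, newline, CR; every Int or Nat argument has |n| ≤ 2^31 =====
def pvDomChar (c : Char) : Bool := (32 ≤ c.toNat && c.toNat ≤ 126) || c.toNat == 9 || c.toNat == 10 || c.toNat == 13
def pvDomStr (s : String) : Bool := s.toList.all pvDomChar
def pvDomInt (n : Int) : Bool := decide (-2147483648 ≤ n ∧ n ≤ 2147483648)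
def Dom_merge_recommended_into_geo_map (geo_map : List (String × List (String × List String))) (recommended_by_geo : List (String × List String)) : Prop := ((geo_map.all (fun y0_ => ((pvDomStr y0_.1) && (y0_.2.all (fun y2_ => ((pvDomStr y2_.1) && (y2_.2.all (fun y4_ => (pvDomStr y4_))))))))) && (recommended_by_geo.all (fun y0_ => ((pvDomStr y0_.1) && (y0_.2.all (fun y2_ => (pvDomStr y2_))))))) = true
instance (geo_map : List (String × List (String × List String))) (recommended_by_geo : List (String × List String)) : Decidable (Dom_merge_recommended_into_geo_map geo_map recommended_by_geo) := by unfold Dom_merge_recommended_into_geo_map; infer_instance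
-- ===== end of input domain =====

-- B re-indexes the recommendations by normalized geo once and then builds the result in one
-- pass over geo_map plus one pass over the leftover recommended keys (objective: alternative
-- decomposition; A instead rebuilds and re-sorts a blacklist on every recommended entry).

-- ===== PORT A =====
-- module helper used by both versions; '(geo or "")' equals geo for every string input
def normalize_geo_key (geo : String) : String :=
  let g := PySem.Str.lower (PySem.Str.strip geo)
  if g == "gb" then "uk" else g

-- the dict literal {"blacklist": [], "whitelist": []}
def pvEmptyBucket : PySem.Dict String (List String) :=
  PySem.Dict.ofList [("blacklist", []), ("whitelist", [])]

-- body of A's dict comprehension: {"blacklist": list(v.get("blacklist", [])), "whitelist": list(v.get("whitelist", []))}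
def pvCopyBucket (v : List (String × List String)) : PySem.Dict String (List String) :=
  let vd := PySem.Dict.ofList v
  PySem.Dict.ofList [("blacklist", vd.getD "blacklist" []), ("whitelist", vd.getD "whitelist" [])]

-- body of A's 'for geo, sources in recommended_by_geo.items()' loop (setdefault + in-place
-- blacklist overwrite); bucket["blacklist"] always exists here, so getD is exact
def pvAStep (o : PySem.Dict String (PySem.Dict String (List String))) (p : String × List String) :
    PySem.Dict String (PySem.Dict String (List String)) :=
  let g := normalize_geo_key p.1
  let o1 := o.setdefault g pvEmptyBucket
  let bucket := o1.getD g pvEmptyBucket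
  let merged : PySem.Set String := PySem.Set.union (PySem.Set.ofList (bucket.getD "blacklist" [])) p.2
  o1.insert g (bucket.insert "blacklist" (PySem.List.sorted merged (fun x => x)))

def merge_recommended_into_geo_map (geo_map : List (String × List (String × List String))) (recommended_by_geo : List (String × List String)) : List (String × List (String × List String)) :=
  let gd := PySem.Dict.ofList geo_map
  let rd := PySem.Dict.ofList recommended_by_geo
  let out0 : PySem.Dict String (PySem.Dict String (List String)) :=
    gd.items.foldl (fun o q => o.insert q.1 (pvCopyBucket q.2)) PySem.Dict.empty
  let out := rd.items.foldl pvAStep out0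
  out.items.map (fun q => (q.1, q.2.items))

-- ===== PORT B =====
-- body of B's 'rec[k] = rec.get(k, set()) | set(sources)' loop
def pvRecStep (r : PySem.Dict String (PySem.Set String)) (p : String × List String) :
    PySem.Dict String (PySem.Set String) :=
  let k := normalize_geo_key p.1
  r.insert k (PySem.Set.union (r.getD k PySem.Set.empty) p.2)

-- body of B's comprehension over geo_map.items() (the inner dict literal written as its pair list)
def pvBEntry (rec : PySem.Dict String (PySem.Set String)) (q : String × List (String × List String)) :
    String × List (String × List String) :=
  let vd := PySem.Dict.ofList q.2
  let bl := vd.getD "blacklist" []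
  (q.1, [("blacklist", if rec.contains q.1 then
            PySem.List.sorted (PySem.Set.union (PySem.Set.ofList bl) (rec.getD q.1 PySem.Set.empty)) (fun x => x)
          else bl),
         ("whitelist", vd.getD "whitelist" [])])

-- body of B's comprehension over the leftover rec items
def pvBNew (q : String × PySem.Set String) : String × List (String × List String) :=
  (q.1, [("blacklist", PySem.List.sorted q.2 (fun x => x)), ("whitelist", ([] : List String))])

def merge_recommended_into_geo_map_alt (geo_map : List (String × List (String × List String))) (recommended_by_geo : List (String × List String)) : List (String × List (String × List String)) :=
  let gd := PySem.Dict.ofList geo_map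
  let rd := PySem.Dict.ofList recommended_by_geo
  let rec_ := rd.items.foldl pvRecStep PySem.Dict.empty
  let items := gd.items.map (pvBEntry rec_)
      ++ (rec_.items.filter (fun q => !(gd.contains q.1))).map pvBNew
  -- 'return dict(items)'
  (PySem.Dict.ofList items).items

-- ===== PRECONDITION & SPEC =====
def Spec_merge_recommended_into_geo_map (geo_map : List (String × List (String × List String))) (recommended_by_geo : List (String × List String)) (out : List (String × List (String × List String))) : Prop := out = merge_recommended_into_geo_map_alt geo_map recommended_by_geo
instance (geo_map : List (String × List (String × List String))) (recommended_by_geo : List (String × List String)) (out : List (String × List (String × List String))) : Decidable (Spec_merge_recommended_into_geo_map geo_map recommended_by_geo out) := by unfold Spec_merge_recommended_into_geo_map; infer_instance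

-- ===== CLAIM (what is proved, stated in full; the proofs are below) =====
def Claim_equal_merge_recommended_into_geo_map : Prop := ∀ (geo_map : List (String × List (String × List String))) (recommended_by_geo : List (String × List String)), Dom_merge_recommended_into_geo_map geo_map recommended_by_geo → Spec_merge_recommended_into_geo_map geo_map recommended_by_geo (merge_recommended_into_geo_map geo_map recommended_by_geo)

-- ===== LEMMAS AND PROOFS =====

-- the blacklist A's state holds at geo_map key q.1 (value q.2), as a function of B's rec index
def pvBlOf (rec : PySem.Dict String (PySem.Set String)) (q : String × List (String × List String)) :
    List String :=
  if rec.contains q.1 then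
    PySem.List.sorted (PySem.Set.union (PySem.Set.ofList ((PySem.Dict.ofList q.2).getD "blacklist" []))
      (rec.getD q.1 PySem.Set.empty)) (fun x => x)
  else (PySem.Dict.ofList q.2).getD "blacklist" []

def pvEntryA (rec : PySem.Dict String (PySem.Set String)) (q : String × List (String × List String)) :
    String × PySem.Dict String (List String) :=
  (q.1, PySem.Dict.ofList [("blacklist", pvBlOf rec q), ("whitelist", (PySem.Dict.ofList q.2).getD "whitelist" [])])

def pvNewEntryA (q : String × PySem.Set String) : String × PySem.Dict String (List String) :=
  (q.1, PySem.Dict.ofList [("blacklist", PySem.List.sorted q.2 (fun x => x)), ("whitelist", [])])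

-- the shape of A's dict state after any number of recommended items, parametrised by B's rec index
def pvEstate (gd : PySem.Dict String (List (String × List String)))
    (rec : PySem.Dict String (PySem.Set String)) : List (String × PySem.Dict String (List String)) :=
  gd.items.map (pvEntryA rec) ++ (rec.items.filter (fun q => !(gd.contains q.1))).map pvNewEntryA

lemma pvBucketGetBl (x y d : List String) :
    (PySem.Dict.ofList [("blacklist", x), ("whitelist", y)]).getD "blacklist" d = x := rfl

lemma pvBucketInsBl (x y z : List String) :
    (PySem.Dict.ofList [("blacklist", x), ("whitelist", y)]).insert "blacklist" z
      = PySem.Dict.ofList [("blacklist", z), ("whitelist", y)] := rfl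

lemma pvSortedCongr (s t : List String) (hs : s.Nodup) (ht : t.Nodup)
    (h : ∀ x, x ∈ s ↔ x ∈ t) :
    PySem.List.sorted s (fun x => x) = PySem.List.sorted t (fun x => x) :=
  PySem.List.sorted_eq_sorted_of_perm s t (fun x => x) (fun _ _ hxy => hxy)
    ((List.perm_ext_iff_of_nodup hs ht).mpr h)

lemma pvMemBlOf (rec : PySem.Dict String (PySem.Set String))
    (q : String × List (String × List String)) (x : String) :
    x ∈ pvBlOf rec q ↔
      x ∈ (PySem.Dict.ofList q.2).getD "blacklist" [] ∨ x ∈ rec.getD q.1 PySem.Set.empty := by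
  unfold pvBlOf
  by_cases hc : rec.contains q.1 = true
  · simp [hc, PySem.List.mem_sorted, PySem.Set.union, PySem.Set.mem_update, PySem.Set.mem_ofList]
  · rw [if_neg hc, PySem.Dict.getD_of_not_contains rec PySem.Set.empty (by simpa using hc)]
    simp [PySem.Set.empty]

-- filter by key commutes with a key-preserving value replacement
lemma pvFilterRep {ν : Type} (g : String) (S : ν) (cf : String → Bool) (R : List (String × ν)) :
    (R.map (fun q => if (q.1 == g) = true then (g, S) else q)).filter (fun q => !(cf q.1)) =
      (R.filter (fun q => !(cf q.1))).map (fun q => if (q.1 == g) = true then (g, S) else q) := by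
  have hpred : ∀ q : String × ν,
      (!(cf ((if (q.1 == g) = true then (g, S) else q)).1)) = !(cf q.1) := by
    intro q
    by_cases hq : (q.1 == g) = true
    · have : q.1 = g := by simpa using hq
      simp [hq, this]
    · simp [hq]
  rw [List.filter_map]
  exact congrArg _ (List.filter_congr (fun q _ => hpred q))

-- the first entry with a given key survives a filter that keeps that key
lemma pvFindFilterKey {ν : Type} (R : List (String × ν)) (cf : String × ν → Bool) (g : String)
    (h : ∀ q ∈ R, q.1 = g → cf q = true) :
    (R.filter cf).find? (fun q => q.1 == g) = R.find? (fun q => q.1 == g) := by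
  induction R with
  | nil => rfl
  | cons q R ih =>
    have ih' := ih (fun q hqm => h q (List.mem_cons_of_mem _ hqm))
    by_cases hq : q.1 = g
    · have hcf : cf q = true := h q (List.mem_cons_self ..) hq
      simp [hcf, hq]
    · cases hcf : cf q <;> simp [hcf, hq, ih']

lemma pvFindE_geo (gd : PySem.Dict String (List (String × List String)))
    (rec : PySem.Dict String (PySem.Set String)) (g : String)
    (v0 : List (String × List String)) (hv0 : gd.get? g = some v0) :
    (pvEstate gd rec).find? (fun e => e.1 == g) = some (pvEntryA rec (g, v0)) := by
  obtain ⟨q0, hq0, hq02⟩ : ∃ q0, gd.items.find? (fun q => q.1 == g) = some q0 ∧ q0.2 = v0 := by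
    have := hv0
    unfold PySem.Dict.get? at this
    rcases Option.map_eq_some_iff.mp this with ⟨q0, h1, h2⟩
    exact ⟨q0, h1, h2⟩
  have hq01 : q0.1 = g := by
    have := List.find?_some hq0
    simpa using this
  unfold pvEstate
  rw [List.find?_append, List.find?_map]
  have hpred : ((fun (e : String × PySem.Dict String (List String)) => e.1 == g) ∘ pvEntryA rec)
      = fun (q : String × List (String × List String)) => q.1 == g := rfl
  rw [hpred, hq0]
  have : q0 = (g, v0) := by
    cases q0; simp_all
  simp [this]

lemma pvFindE_rec (gd : PySem.Dict String (List (String × List String)))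
    (rec : PySem.Dict String (PySem.Set String)) (g : String)
    (s0 : PySem.Set String) (hv0 : gd.get? g = none) (hs0 : rec.get? g = some s0) :
    (pvEstate gd rec).find? (fun e => e.1 == g) = some (pvNewEntryA (g, s0)) := by
  have hGnone : gd.items.find? (fun q => q.1 == g) = none := by
    have := hv0
    unfold PySem.Dict.get? at this
    exact Option.map_eq_none_iff.mp this
  obtain ⟨q0, hq0, hq02⟩ : ∃ q0, rec.items.find? (fun q => q.1 == g) = some q0 ∧ q0.2 = s0 := by
    have := hs0
    unfold PySem.Dict.get? at this
    rcases Option.map_eq_some_iff.mp this with ⟨q0, h1, h2⟩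
    exact ⟨q0, h1, h2⟩
  have hq01 : q0.1 = g := by
    have := List.find?_some hq0
    simpa using this
  have hgdc : gd.contains g = false := by
    rw [PySem.Dict.contains_eq_isSome_get?, hv0]; rfl
  unfold pvEstate
  rw [List.find?_append, List.find?_map]
  have hpred : ((fun (e : String × PySem.Dict String (List String)) => e.1 == g) ∘ pvEntryA rec)
      = fun (q : String × List (String × List String)) => q.1 == g := rfl
  rw [hpred, hGnone]
  simp only [Option.map_none, Option.none_or]
  rw [List.find?_map]
  have hpred2 : ((fun (e : String × PySem.Dict String (List String)) => e.1 == g) ∘ pvNewEntryA)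
      = fun (q : String × PySem.Set String) => q.1 == g := rfl
  rw [hpred2, pvFindFilterKey _ _ g (fun q _ hqg => by simp [hqg, hgdc]), hq0]
  have : q0 = (g, s0) := by
    cases q0; simp_all
  simp [this]

lemma pvFindE_none (gd : PySem.Dict String (List (String × List String)))
    (rec : PySem.Dict String (PySem.Set String)) (g : String)
    (hv0 : gd.get? g = none) (hs0 : rec.get? g = none) :
    (pvEstate gd rec).find? (fun e => e.1 == g) = none := by
  have hGnone : gd.items.find? (fun q => q.1 == g) = none := by
    have := hv0
    unfold PySem.Dict.get? at this
    exact Option.map_eq_none_iff.mp this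
  have hRnone : rec.items.find? (fun q => q.1 == g) = none := by
    have := hs0
    unfold PySem.Dict.get? at this
    exact Option.map_eq_none_iff.mp this
  have hgdc : gd.contains g = false := by
    rw [PySem.Dict.contains_eq_isSome_get?, hv0]; rfl
  unfold pvEstate
  rw [List.find?_append, List.find?_map]
  have hpred : ((fun (e : String × PySem.Dict String (List String)) => e.1 == g) ∘ pvEntryA rec)
      = fun (q : String × List (String × List String)) => q.1 == g := rfl
  rw [hpred, hGnone]
  simp only [Option.map_none, Option.none_or]
  rw [List.find?_map]
  have hpred2 : ((fun (e : String × PySem.Dict String (List String)) => e.1 == g) ∘ pvNewEntryA)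
      = fun (q : String × PySem.Set String) => q.1 == g := rfl
  rw [hpred2, pvFindFilterKey _ _ g (fun q _ hqg => by simp [hqg, hgdc]), hRnone]
  rfl

lemma pvStep (gd : PySem.Dict String (List (String × List String)))
    (rec : PySem.Dict String (PySem.Set String)) (hG : gd.keys.Nodup) (hR : rec.keys.Nodup)
    (hV : ∀ k, (rec.getD k PySem.Set.empty).Nodup) (p : String × List String) :
    pvAStep (PySem.Dict.mk (pvEstate gd rec)) p = PySem.Dict.mk (pvEstate gd (pvRecStep rec p)) := by
  unfold pvAStep pvRecStep
  dsimp only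
  generalize normalize_geo_key p.1 = g
  have hmkget : ∀ (o : Option (String × PySem.Dict String (List String))),
      (pvEstate gd rec).find? (fun e => e.1 == g) = o →
      (PySem.Dict.mk (pvEstate gd rec)).get? g = Option.map (fun x => x.2) o := by
    intro o ho
    show Option.map (fun x => x.2) ((pvEstate gd rec).find? (fun e => e.1 == g)) = _
    rw [ho]
  cases hv0 : gd.get? g with
  | some v0 =>
    -- ----- the normalized geo is a geo_map key -----
    have hgdc : gd.contains g = true := by
      rw [PySem.Dict.contains_eq_isSome_get?, hv0]; rfl
    have hget := hmkget _ (pvFindE_geo gd rec g v0 hv0)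
    have hcont : (PySem.Dict.mk (pvEstate gd rec)).contains g = true := by
      rw [PySem.Dict.contains_eq_isSome_get?, hget]; rfl
    rw [PySem.Dict.setdefault_of_contains _ _ hcont,
        PySem.Dict.getD_of_get?_eq_some _ _ hget]
    dsimp only [pvEntryA]
    rw [pvBucketGetBl, pvBucketInsBl]
    apply PySem.Dict.ext
    rw [PySem.Dict.items_insert_of_contains _ _ hcont]
    show (pvEstate gd rec).map _ = pvEstate gd (rec.insert g (PySem.Set.union (rec.getD g PySem.Set.empty) p.2))
    unfold pvEstate
    rw [List.map_append, List.map_map, List.map_map]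
    congr 1
    · -- entries coming from geo_map
      apply List.map_congr_left
      intro a ha
      by_cases hq : a.1 = g
      · have hav : a.2 = v0 := by
          have hmem : (a.1, a.2) ∈ gd.items := by simpa using ha
          have := PySem.Dict.get?_of_mem_items gd hmem hG
          rw [hq, hv0] at this
          exact (Option.some_injective _ this.symm)
        have h1 : ((pvEntryA rec a).1 == g) = true := by
          simpa [pvEntryA] using hq
        show (if ((pvEntryA rec a).1 == g) = true then _ else _) = _
        rw [if_pos h1]
        have hbl' : pvBlOf (rec.insert g (PySem.Set.union (rec.getD g PySem.Set.empty) p.2)) a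
            = PySem.List.sorted (PySem.Set.union (PySem.Set.ofList ((PySem.Dict.ofList v0).getD "blacklist" []))
                (PySem.Set.union (rec.getD g PySem.Set.empty) p.2)) (fun x => x) := by
          unfold pvBlOf
          rw [PySem.Dict.contains_insert, PySem.Dict.getD_insert]
          simp [hq, hav]
        unfold pvEntryA
        rw [hbl', hq, hav]
        refine congrArg (fun z => ((g : String), PySem.Dict.ofList [("blacklist", z),
          ("whitelist", (PySem.Dict.ofList v0).getD "whitelist" [])])) ?_
        apply pvSortedCongr
        · exact PySem.Set.nodup_update _ _ (PySem.Set.nodup_ofList _)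
        · exact PySem.Set.nodup_update _ _ (PySem.Set.nodup_ofList _)
        · intro x
          have h2 := pvMemBlOf rec (g, v0) x
          dsimp only at h2
          simp only [PySem.Set.union, PySem.Set.mem_update, PySem.Set.mem_ofList] at h2 ⊢
          tauto
      · have h1 : ((pvEntryA rec a).1 == g) = false := by
          simpa [pvEntryA] using hq
        show (if ((pvEntryA rec a).1 == g) = true then _ else _) = _
        rw [if_neg (by simp [h1])]
        unfold pvEntryA pvBlOf
        rw [PySem.Dict.contains_insert, PySem.Dict.getD_insert, if_neg hq]
        simp [hq]
    · -- entries appended for recommended-only geos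
      cases hcr : rec.contains g with
      | true =>
        rw [PySem.Dict.items_insert_of_contains _ _ hcr,
            pvFilterRep g _ (fun k => gd.contains k) rec.items, List.map_map]
        apply List.map_congr_left
        intro q hq
        have hqg : q.1 ≠ g := by
          have : gd.contains q.1 = false := by
            have := (List.mem_filter.mp hq).2
            simpa using this
          intro h; rw [h, hgdc] at this; cases this
        have h1 : ((pvNewEntryA q).1 == g) = false := by
          simpa [pvNewEntryA] using hqg
        have h2 : (q.1 == g) = false := by simpa using hqg
        show (if ((pvNewEntryA q).1 == g) = true then _ else _) = _
        rw [if_neg (by simp [h1])]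
        show _ = pvNewEntryA (if (q.1 == g) = true then _ else q)
        rw [if_neg (by simp [h2])]
      | false =>
        rw [PySem.Dict.items_insert_of_not_contains _ _ hcr, List.filter_append]
        have : List.filter (fun q => !gd.contains q.1)
            [(g, PySem.Set.union (rec.getD g PySem.Set.empty) p.2)] = [] := by
          simp [hgdc]
        rw [this, List.append_nil]
        apply List.map_congr_left
        intro q hq
        have hqg : q.1 ≠ g := by
          have : gd.contains q.1 = false := by
            have := (List.mem_filter.mp hq).2
            simpa using this
          intro h; rw [h, hgdc] at this; cases this
        have h1 : ((pvNewEntryA q).1 == g) = false := by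
          simpa [pvNewEntryA] using hqg
        show (if ((pvNewEntryA q).1 == g) = true then _ else _) = _
        rw [if_neg (by simp [h1])]
  | none =>
    have hgdc : gd.contains g = false := by
      rw [PySem.Dict.contains_eq_isSome_get?, hv0]; rfl
    have hGkey : ∀ a ∈ gd.items, a.1 ≠ g := by
      intro a ha h
      have hmem : (a.1, a.2) ∈ gd.items := by simpa using ha
      have := PySem.Dict.get?_of_mem_items gd hmem hG
      rw [h, hv0] at this
      cases this
    cases hs0 : rec.get? g with
    | some s0 =>
      -- ----- the normalized geo was already seen among the recommended geos -----
      have hrc : rec.contains g = true := by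
        rw [PySem.Dict.contains_eq_isSome_get?, hs0]; rfl
      have hget := hmkget _ (pvFindE_rec gd rec g s0 hv0 hs0)
      have hcont : (PySem.Dict.mk (pvEstate gd rec)).contains g = true := by
        rw [PySem.Dict.contains_eq_isSome_get?, hget]; rfl
      rw [PySem.Dict.setdefault_of_contains _ _ hcont,
          PySem.Dict.getD_of_get?_eq_some _ _ hget]
      dsimp only [pvNewEntryA]
      rw [pvBucketGetBl, pvBucketInsBl]
      apply PySem.Dict.ext
      rw [PySem.Dict.items_insert_of_contains _ _ hcont]
      show (pvEstate gd rec).map _ = pvEstate gd (rec.insert g (PySem.Set.union (rec.getD g PySem.Set.empty) p.2))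
      unfold pvEstate
      rw [List.map_append, List.map_map, List.map_map]
      congr 1
      · apply List.map_congr_left
        intro a ha
        have hq := hGkey a ha
        have h1 : ((pvEntryA rec a).1 == g) = false := by
          simpa [pvEntryA] using hq
        show (if ((pvEntryA rec a).1 == g) = true then _ else _) = _
        rw [if_neg (by simp [h1])]
        unfold pvEntryA pvBlOf
        rw [PySem.Dict.contains_insert, PySem.Dict.getD_insert, if_neg hq]
        simp [hq]
      · rw [PySem.Dict.items_insert_of_contains _ _ hrc,
            pvFilterRep g _ (fun k => gd.contains k) rec.items, List.map_map]
        apply List.map_congr_left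
        intro q hq
        by_cases hqg : q.1 = g
        · have hqs : q.2 = s0 := by
            have hmem : (q.1, q.2) ∈ rec.items := by
              simpa using (List.mem_filter.mp hq).1
            have := PySem.Dict.get?_of_mem_items rec hmem hR
            rw [hqg, hs0] at this
            exact (Option.some_injective _ this.symm)
          have h1 : ((pvNewEntryA q).1 == g) = true := by
            simpa [pvNewEntryA] using hqg
          have h2 : (q.1 == g) = true := by simpa using hqg
          show (if ((pvNewEntryA q).1 == g) = true then _ else _) = _
          rw [if_pos h1]
          show _ = pvNewEntryA (if (q.1 == g) = true then ((g : String),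
            PySem.Set.union (rec.getD g PySem.Set.empty) p.2) else q)
          rw [if_pos h2]
          dsimp only [pvNewEntryA]
          refine congrArg (fun z => ((g : String), PySem.Dict.ofList [("blacklist", z),
            ("whitelist", ([] : List String))])) ?_
          have hs0D : rec.getD g PySem.Set.empty = s0 :=
            PySem.Dict.getD_of_get?_eq_some _ _ hs0
          apply pvSortedCongr
          · exact PySem.Set.nodup_update _ _ (PySem.Set.nodup_ofList _)
          · exact PySem.Set.nodup_update _ _ (hV g)
          · intro x
            simp only [PySem.Set.union, PySem.Set.mem_update, PySem.Set.mem_ofList,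
              PySem.List.mem_sorted, hs0D]
        · have h1 : ((pvNewEntryA q).1 == g) = false := by
            simpa [pvNewEntryA] using hqg
          have h2 : (q.1 == g) = false := by simpa using hqg
          show (if ((pvNewEntryA q).1 == g) = true then _ else _) = _
          rw [if_neg (by simp [h1])]
          show _ = pvNewEntryA (if (q.1 == g) = true then _ else q)
          rw [if_neg (by simp [h2])]
    | none =>
      -- ----- a brand-new normalized geo -----
      have hrc : rec.contains g = false := by
        rw [PySem.Dict.contains_eq_isSome_get?, hs0]; rfl
      have hRkey : ∀ q ∈ rec.items, q.1 ≠ g := by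
        intro q hqm h
        have hmem : (q.1, q.2) ∈ rec.items := by simpa using hqm
        have := PySem.Dict.get?_of_mem_items rec hmem hR
        rw [h, hs0] at this
        cases this
      have hcont : (PySem.Dict.mk (pvEstate gd rec)).contains g = false := by
        rw [PySem.Dict.contains_eq_isSome_get?, hmkget _ (pvFindE_none gd rec g hv0 hs0)]; rfl
      have hB0 : pvEmptyBucket = PySem.Dict.ofList [("blacklist", ([] : List String)), ("whitelist", ([] : List String))] := rfl
      rw [PySem.Dict.setdefault_of_not_contains _ _ hcont, hB0]
      have hd1 : (PySem.Dict.mk (pvEstate gd rec)).insert g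
            (PySem.Dict.ofList [("blacklist", ([] : List String)), ("whitelist", ([] : List String))])
          = PySem.Dict.mk (pvEstate gd rec
              ++ [(g, PySem.Dict.ofList [("blacklist", ([] : List String)), ("whitelist", ([] : List String))])]) := by
        apply PySem.Dict.ext
        rw [PySem.Dict.items_insert_of_not_contains _ _ hcont]
      rw [hd1]
      have hget1 : (PySem.Dict.mk (pvEstate gd rec
            ++ [(g, PySem.Dict.ofList [("blacklist", ([] : List String)), ("whitelist", ([] : List String))])])).get? g
          = some (PySem.Dict.ofList [("blacklist", ([] : List String)), ("whitelist", ([] : List String))]) := by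
        show Option.map (fun x => x.2)
            ((pvEstate gd rec ++ [(g, PySem.Dict.ofList [("blacklist", ([] : List String)), ("whitelist", ([] : List String))])]).find? (fun e => e.1 == g)) = _
        rw [List.find?_append, pvFindE_none gd rec g hv0 hs0]
        simp
      have hcont1 : (PySem.Dict.mk (pvEstate gd rec
            ++ [(g, PySem.Dict.ofList [("blacklist", ([] : List String)), ("whitelist", ([] : List String))])])).contains g = true := by
        rw [PySem.Dict.contains_eq_isSome_get?, hget1]; rfl
      rw [PySem.Dict.getD_of_get?_eq_some _ _ hget1]
      rw [pvBucketGetBl, pvBucketInsBl]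
      apply PySem.Dict.ext
      rw [PySem.Dict.items_insert_of_contains _ _ hcont1]
      show (pvEstate gd rec ++ [(g, PySem.Dict.ofList [("blacklist", ([] : List String)), ("whitelist", ([] : List String))])]).map _
          = pvEstate gd (rec.insert g (PySem.Set.union (rec.getD g PySem.Set.empty) p.2))
      rw [List.map_append]
      have hE : (pvEstate gd rec).map (fun p_1 => if (p_1.1 == g) = true then
          (g, PySem.Dict.ofList [("blacklist",
            PySem.List.sorted (PySem.Set.union (PySem.Set.ofList ([] : List String)) p.2) (fun x => x)),
            ("whitelist", ([] : List String))]) else p_1) = pvEstate gd rec := by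
        have : ∀ e ∈ pvEstate gd rec, e.1 ≠ g := by
          intro e he
          unfold pvEstate at he
          rcases List.mem_append.mp he with h | h
          · rcases List.mem_map.mp h with ⟨a, ha, rfl⟩
            exact hGkey a ha
          · rcases List.mem_map.mp h with ⟨q, hqm, rfl⟩
            exact hRkey q (List.mem_of_mem_filter hqm)
        calc (pvEstate gd rec).map _ = (pvEstate gd rec).map id := by
              apply List.map_congr_left
              intro e he
              rw [if_neg (by simp [this e he])]
              rfl
          _ = pvEstate gd rec := List.map_id _
      rw [hE]
      unfold pvEstate
      rw [PySem.Dict.items_insert_of_not_contains _ _ hrc, List.filter_append, List.map_append,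
          List.append_assoc]
      congr 1
      · apply List.map_congr_left
        intro a ha
        have hq := hGkey a ha
        unfold pvEntryA pvBlOf
        rw [PySem.Dict.contains_insert, PySem.Dict.getD_insert, if_neg hq]
        simp [hq]
      · congr 1
        have : List.filter (fun q => !gd.contains q.1)
            [(g, PySem.Set.union (rec.getD g PySem.Set.empty) p.2)]
            = [(g, PySem.Set.union (rec.getD g PySem.Set.empty) p.2)] := by
          simp [hgdc]
        rw [this]
        have hg0 : rec.getD g PySem.Set.empty = PySem.Set.empty :=
          PySem.Dict.getD_of_not_contains _ _ hrc
        simp only [List.map_cons, List.map_nil, pvNewEntryA, hg0]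
        simp

lemma pvMain (gd : PySem.Dict String (List (String × List String))) (hG : gd.keys.Nodup)
    (rest : List (String × List String)) :
    ∀ (rec : PySem.Dict String (PySem.Set String)), rec.keys.Nodup →
      (∀ k, (rec.getD k PySem.Set.empty).Nodup) →
      rest.foldl pvAStep (PySem.Dict.mk (pvEstate gd rec)) =
        PySem.Dict.mk (pvEstate gd (rest.foldl pvRecStep rec)) := by
  induction rest with
  | nil => intro rec _ _; rfl
  | cons x rest ih =>
    intro rec hR hV
    rw [List.foldl_cons, List.foldl_cons, pvStep gd rec hG hR hV x]
    refine ih (pvRecStep rec x) ?_ ?_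
    · show (rec.insert (normalize_geo_key x.1) _).keys.Nodup
      exact PySem.Dict.nodup_keys_insert _ _ _ hR
    · intro k
      show ((rec.insert (normalize_geo_key x.1) _).getD k PySem.Set.empty).Nodup
      rw [PySem.Dict.getD_insert]
      split
      · exact PySem.Set.nodup_update _ _ (hV _)
      · exact hV k

-- the invariants of B's rec-building fold
lemma pvRecFoldInv (l : List (String × List String)) :
    ∀ (rec : PySem.Dict String (PySem.Set String)), rec.keys.Nodup →
      (∀ k, (rec.getD k PySem.Set.empty).Nodup) →
      (l.foldl pvRecStep rec).keys.Nodup ∧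
        ∀ k, ((l.foldl pvRecStep rec).getD k PySem.Set.empty).Nodup := by
  induction l with
  | nil => intro rec hR hV; exact ⟨hR, hV⟩
  | cons x rest ih =>
    intro rec hR hV
    rw [List.foldl_cons]
    refine ih (pvRecStep rec x) ?_ ?_
    · show (rec.insert (normalize_geo_key x.1) _).keys.Nodup
      exact PySem.Dict.nodup_keys_insert _ _ _ hR
    · intro k
      show ((rec.insert (normalize_geo_key x.1) _).getD k PySem.Set.empty).Nodup
      rw [PySem.Dict.getD_insert]
      split
      · exact PySem.Set.nodup_update _ _ (hV _)
      · exact hV k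

-- ===== VERDICT (by name: the statement is the Claim_ definition above) =====
theorem merge_recommended_into_geo_map_spec : Claim_equal_merge_recommended_into_geo_map := by
  intro geo_map recommended_by_geo _
  show merge_recommended_into_geo_map geo_map recommended_by_geo
      = merge_recommended_into_geo_map_alt geo_map recommended_by_geo
  unfold merge_recommended_into_geo_map merge_recommended_into_geo_map_alt
  dsimp only
  set gd := PySem.Dict.ofList geo_map with hgd
  set rd := PySem.Dict.ofList recommended_by_geo with hrd
  have hG : gd.keys.Nodup := PySem.Dict.nodup_keys_ofList _
  -- A's comprehension builds exactly the initial merged state (with an empty rec index)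
  have h0 : gd.items.foldl (fun o q => o.insert q.1 (pvCopyBucket q.2)) PySem.Dict.empty
      = PySem.Dict.mk (pvEstate gd PySem.Dict.empty) := by
    apply PySem.Dict.ext
    rw [PySem.Dict.items_foldl_insert_fresh gd.items (fun q => q.1) (fun q => pvCopyBucket q.2)
      PySem.Dict.empty (fun a _ => PySem.Dict.contains_empty _) hG]
    unfold pvEstate
    show gd.items.map _ = gd.items.map _ ++ _
    have hfe : (PySem.Dict.empty (κ := String) (ν := PySem.Set String)).items.filter
        (fun q => !(gd.contains q.1)) = [] := rfl
    rw [hfe, List.map_nil, List.append_nil]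
    exact List.map_congr_left (fun a _ => rfl)
  rw [h0, pvMain gd hG rd.items PySem.Dict.empty PySem.Dict.nodup_keys_empty
    (fun k => by rw [PySem.Dict.getD_empty]; exact List.nodup_nil)]
  set recF := rd.items.foldl pvRecStep PySem.Dict.empty with hrecF
  have hRF := pvRecFoldInv rd.items PySem.Dict.empty PySem.Dict.nodup_keys_empty
    (fun k => by rw [PySem.Dict.getD_empty]; exact List.nodup_nil)
  -- B's dict(items) keeps its (distinct-keyed) item list unchanged
  have hBitems : (PySem.Dict.ofList (gd.items.map (pvBEntry recF)
        ++ (recF.items.filter (fun q => !(gd.contains q.1))).map pvBNew)).items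
      = gd.items.map (pvBEntry recF)
        ++ (recF.items.filter (fun q => !(gd.contains q.1))).map pvBNew := by
    have hnodup : ((gd.items.map (pvBEntry recF)
        ++ (recF.items.filter (fun q => !(gd.contains q.1))).map pvBNew).map
          (fun (p : String × List (String × List String)) => p.1)).Nodup := by
      rw [List.map_append, List.map_map, List.map_map]
      have hk1 : gd.items.map ((fun (p : String × List (String × List String)) => p.1) ∘ pvBEntry recF)
          = gd.keys := rfl
      have hk2 : (recF.items.filter (fun q => !(gd.contains q.1))).map
            ((fun (p : String × List (String × List String)) => p.1) ∘ pvBNew)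
          = (recF.items.filter (fun q => !(gd.contains q.1))).map (fun q => q.1) := rfl
      rw [hk1, hk2]
      refine List.nodup_append.mpr ⟨hG, ?_, ?_⟩
      · have hsub : ((recF.items.filter (fun q => !(gd.contains q.1))).map (fun q => q.1)).Sublist
            (recF.items.map (fun q => q.1)) := List.filter_sublist.map _
        exact hsub.nodup hRF.1
      · intro k hk1m b hk2m
        rcases List.mem_map.mp hk2m with ⟨q, hqm, rfl⟩
        intro hkq
        have hqc : gd.contains q.1 = false := by
          have := (List.mem_filter.mp hqm).2
          simpa using this
        have hct : gd.contains q.1 = true := by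
          rw [PySem.Dict.contains_iff_mem_keys]
          exact hkq ▸ hk1m
        rw [hct] at hqc
        cases hqc
    have hfr := PySem.Dict.items_foldl_insert_fresh
      (l := gd.items.map (pvBEntry recF) ++ (recF.items.filter (fun q => !(gd.contains q.1))).map pvBNew)
      (k := fun p => p.1) (v := fun p => p.2) (d := PySem.Dict.empty)
      (fun a _ => PySem.Dict.contains_empty _) hnodup
    have heta : PySem.Dict.empty.items ++ List.map
          (fun (a : String × List (String × List String)) => ((fun p => p.1) a, (fun p => p.2) a))
          (gd.items.map (pvBEntry recF) ++ (recF.items.filter (fun q => !(gd.contains q.1))).map pvBNew)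
        = gd.items.map (pvBEntry recF) ++ (recF.items.filter (fun q => !(gd.contains q.1))).map pvBNew := by
      show List.map _ _ = _
      exact (List.map_congr_left (g := id) (fun a _ => rfl)).trans (List.map_id _)
    exact hfr.trans heta
  rw [hBitems]
  show (pvEstate gd recF).map (fun q => (q.1, q.2.items)) = _
  unfold pvEstate
  rw [List.map_append, List.map_map, List.map_map]
  exact congrArg₂ (· ++ ·) (List.map_congr_left (fun a _ => rfl))
    (List.map_congr_left (fun a _ => rfl))
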